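-- pv_equiv track=rewrite | github.com/Juve45/fw-abe | fw_access_tree.py | lagrange_coefficient
-- ===== SOURCE A (Python) =====
-- def modexp(base, exponent, modulus):
--     result = 1
--     base = base % modulus
--     while exponent > 0:
--         if exponent & 1:
--             result = (result * base) % modulus
--         base = (base * base) % modulus
--         exponent >>= 1
--     return result
--
-- def mod_inv(a, p):
--     return modexp(a, p - 2, p)  # Fermat's little theorem
--
-- def lagrange_coefficient(xi, x_values, x, mod):
--
--     numerator = 1
--     denominator = 1
--     for j, xj in enumerate(x_values):
--         if xj != xi:
--             numerator = (numerator * (x - xj)) % mod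
--             denominator = (denominator * (xi - xj)) % mod
--     return (numerator * mod_inv(denominator, mod)) % mod
-- ===== SOURCE B (Python) =====
-- def _modpow(b, e, m):
--     # b^e mod m by recursive halving (returns 1 for e <= 0, like A's skipped loop)
--     if e <= 0:
--         return 1
--     h = _modpow(b, e // 2, m)
--     h = h * h % m
--     if e % 2:
--         h = h * b % m
--     return h
--
-- def lagrange_coefficient(xi, x_values, x, mod):
--     # single running product: multiply each factor (x - xj) and the modular
--     # inverse of (xi - xj) (via Fermat exponent mod-2) element by element
--     acc = 1
--     for xj in x_values:
--         if xj != xi: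
--             acc = acc * (x - xj) * _modpow(xi - xj, mod - 2, mod) % mod
--     return acc % mod
-- ===== Notes on version B (the rewrite author's own statement) =====
-- stated objective: alternative
-- what changed: B replaces A's numerator/denominator split with one running product that folds in a per-element modular inverse (xi-xj)^(mod-2), and computes powers by recursive halving instead of A's iterative LSB square-and-multiply; equal for every nonzero modulus since a product of Fermat powers is congruent to the Fermat power of the product.
import Mathlib
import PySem

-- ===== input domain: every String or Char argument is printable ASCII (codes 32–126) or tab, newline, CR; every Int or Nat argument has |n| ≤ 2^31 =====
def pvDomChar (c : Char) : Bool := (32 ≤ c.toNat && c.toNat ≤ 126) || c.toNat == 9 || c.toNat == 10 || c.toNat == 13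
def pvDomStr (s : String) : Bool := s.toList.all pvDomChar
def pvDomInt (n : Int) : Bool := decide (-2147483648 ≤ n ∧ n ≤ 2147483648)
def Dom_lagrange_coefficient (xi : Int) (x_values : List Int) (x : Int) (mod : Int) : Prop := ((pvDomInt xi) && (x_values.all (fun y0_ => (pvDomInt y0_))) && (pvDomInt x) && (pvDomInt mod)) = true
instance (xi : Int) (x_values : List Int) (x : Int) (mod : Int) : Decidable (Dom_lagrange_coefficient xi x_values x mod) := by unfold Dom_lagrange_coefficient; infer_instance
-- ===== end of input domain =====

-- B replaces A's numerator/denominator split by one running product that folds in a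
-- per-element modular inverse (xi-xj)^(mod-2) computed by recursive halving (alternative
-- algorithm of similar cost; equal for every nonzero modulus).

-- ===== PORT A =====
-- the while-loop of modexp; 'exponent & 1' is PySem.Int.band, 'exponent >>= 1' is floor
-- division by 2 (exact: Python '>>' is an arithmetic shift)
def pvModexpLoop (modulus result base exponent : Int) : Int :=
  if h : 0 < exponent then
    pvModexpLoop modulus
      (if PySem.Int.band exponent 1 ≠ 0 then PySem.Int.mod (result * base) modulus else result)
      (PySem.Int.mod (base * base) modulus)
      (PySem.Int.floordiv exponent 2)
  else result
termination_by exponent.toNat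
decreasing_by
  have h1 : PySem.Int.floordiv exponent 2 < exponent :=
    (PySem.Int.floordiv_lt_iff_lt_mul (by norm_num)).mpr (by omega)
  have h2 : (0:Int) ≤ PySem.Int.floordiv exponent 2 :=
    (PySem.Int.le_floordiv_iff_mul_le (by norm_num)).mpr (by omega)
  omega

def modexp (base exponent modulus : Int) : Int :=
  pvModexpLoop modulus 1 (PySem.Int.mod base modulus) exponent

def mod_inv (a p : Int) : Int := modexp a (p - 2) p

-- A's for-loop (the index j of 'enumerate(x_values)' is unused, so the loop runs over the values)
def pvLoopA (xi x m : Int) (num den : Int) : List Int → Int × Int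
  | [] => (num, den)
  | xj :: rest =>
      if xj ≠ xi then
        pvLoopA xi x m (PySem.Int.mod (num * (x - xj)) m) (PySem.Int.mod (den * (xi - xj)) m) rest
      else pvLoopA xi x m num den rest

def lagrange_coefficient (xi : Int) (x_values : List Int) (x : Int) (mod : Int) : Int :=
  let s := pvLoopA xi x mod 1 1 x_values
  PySem.Int.mod (s.1 * mod_inv s.2 mod) mod

-- ===== PORT B =====
def pvModpow (b e m : Int) : Int :=
  if h : e ≤ 0 then 1
  else
    let h1 := pvModpow b (PySem.Int.floordiv e 2) m
    let h2 := PySem.Int.mod (h1 * h1) m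
    if PySem.Int.mod e 2 ≠ 0 then PySem.Int.mod (h2 * b) m else h2
termination_by e.toNat
decreasing_by
  have h1 : PySem.Int.floordiv e 2 < e :=
    (PySem.Int.floordiv_lt_iff_lt_mul (by norm_num)).mpr (by omega)
  have h2 : (0:Int) ≤ PySem.Int.floordiv e 2 :=
    (PySem.Int.le_floordiv_iff_mul_le (by norm_num)).mpr (by omega)
  omega

-- B's for-loop: a single running product
def pvLoopB (xi x m : Int) (acc : Int) : List Int → Int
  | [] => acc
  | xj :: rest =>
      if xj ≠ xi then
        pvLoopB xi x m (PySem.Int.mod (acc * (x - xj) * pvModpow (xi - xj) (m - 2) m) m) rest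
      else pvLoopB xi x m acc rest

def lagrange_coefficient_alt (xi : Int) (x_values : List Int) (x : Int) (mod : Int) : Int :=
  PySem.Int.mod (pvLoopB xi x mod 1 x_values) mod

-- ===== PRECONDITION & SPEC =====
-- Pre_ excludes exactly mod = 0, where the Python A raises ZeroDivisionError.
def Pre_lagrange_coefficient (xi : Int) (x_values : List Int) (x : Int) (mod : Int) : Prop := mod ≠ 0
instance (xi : Int) (x_values : List Int) (x : Int) (mod : Int) : Decidable (Pre_lagrange_coefficient xi x_values x mod) := by unfold Pre_lagrange_coefficient; infer_instance
def pvWitness_lagrange_coefficient : Int × List Int × Int × Int := (1, [2, 3], 0, 7)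

def Spec_lagrange_coefficient (xi : Int) (x_values : List Int) (x : Int) (mod : Int) (out : Int) : Prop := out = lagrange_coefficient_alt xi x_values x mod
instance (xi : Int) (x_values : List Int) (x : Int) (mod : Int) (out : Int) : Decidable (Spec_lagrange_coefficient xi x_values x mod out) := by unfold Spec_lagrange_coefficient; infer_instance

-- ===== CLAIM (what is proved, stated in full; the proofs are below) =====
def Claim_equal_lagrange_coefficient : Prop := ∀ (xi : Int) (x_values : List Int) (x : Int) (mod : Int), Dom_lagrange_coefficient xi x_values x mod → Pre_lagrange_coefficient xi x_values x mod → Spec_lagrange_coefficient xi x_values x mod (lagrange_coefficient xi x_values x mod)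

-- ===== LEMMAS AND PROOFS =====

theorem pv_dvd_abs_eq_zero {n m : Int} (h : m ∣ n) (h2 : |n| < |m|) : n = 0 := by
  rcases h with ⟨t, rfl⟩
  by_cases ht : t = 0
  · simp [ht]
  · exfalso
    have h1 : (1:Int) ≤ |t| := Int.one_le_abs (by omega)
    have h3 := mul_le_mul_of_nonneg_left h1 (abs_nonneg m)
    rw [abs_mul] at h2; linarith

theorem pvmod_modeq (a m : Int) : PySem.Int.mod a m ≡ a [ZMOD m] := by
  have h := PySem.Int.floordiv_mul_add_mod a m
  rw [Int.modEq_iff_dvd]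
  exact ⟨PySem.Int.floordiv a m, by linarith⟩

theorem pvmod_congr {m : Int} (hm : m ≠ 0) {a b : Int} (h : a ≡ b [ZMOD m]) :
    PySem.Int.mod a m = PySem.Int.mod b m := by
  have ha := PySem.Int.floordiv_mul_add_mod a m
  have hb := PySem.Int.floordiv_mul_add_mod b m
  obtain ⟨k, hk⟩ := h.dvd
  have hdvd : m ∣ (PySem.Int.mod a m - PySem.Int.mod b m) :=
    ⟨PySem.Int.floordiv b m - PySem.Int.floordiv a m - k, by linear_combination ha - hb - hk⟩
  have h0 : PySem.Int.mod a m - PySem.Int.mod b m = 0 := by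
    refine pv_dvd_abs_eq_zero hdvd ?_
    rcases lt_or_gt_of_ne hm with hneg | hpos
    · have b1 := PySem.Int.mod_neg_bounds (a := a) hneg
      have b2 := PySem.Int.mod_neg_bounds (a := b) hneg
      rw [abs_of_neg hneg, abs_lt]
      omega
    · have b1 := PySem.Int.mod_nonneg (a := a) hpos
      have b2 := PySem.Int.mod_lt (a := a) hpos
      have b3 := PySem.Int.mod_nonneg (a := b) hpos
      have b4 := PySem.Int.mod_lt (a := b) hpos
      rw [abs_of_pos hpos, abs_lt]
      omega
  omega

theorem pv_split {e : Int} (he : 0 < e) :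
    e.toNat = 2 * (PySem.Int.floordiv e 2).toNat + (PySem.Int.mod e 2).toNat ∧
    (PySem.Int.mod e 2 = 0 ∨ PySem.Int.mod e 2 = 1) ∧ 0 ≤ PySem.Int.floordiv e 2 := by
  have h1 := PySem.Int.floordiv_mul_add_mod e 2
  have h2 := PySem.Int.mod_nonneg (a := e) (show (0:Int) < 2 by norm_num)
  have h3 := PySem.Int.mod_lt (a := e) (show (0:Int) < 2 by norm_num)
  omega

theorem pv_sq_pow (b : Int) (k : Nat) : (b * b) ^ k = b ^ (2 * k) := by
  rw [← pow_two, ← pow_mul]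

theorem pvModexpLoop_spec (m : Int) : ∀ (n : Nat) (e r b : Int), e.toNat ≤ n →
    pvModexpLoop m r b e ≡ r * b ^ e.toNat [ZMOD m] := by
  intro n
  induction n with
  | zero =>
    intro e r b hle
    rw [pvModexpLoop]
    have he : ¬ 0 < e := by omega
    have h0 : e.toNat = 0 := by omega
    simp [he, h0]
  | succ n ih =>
    intro e r b hle
    by_cases he : 0 < e
    · obtain ⟨hsum, hbit, hq⟩ := pv_split he
      have hle' : (PySem.Int.floordiv e 2).toNat ≤ n := by omega
      rw [pvModexpLoop]
      simp only [he, dite_true, PySem.Int.band_one]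
      have hbb : (PySem.Int.mod (b * b) m) ^ (PySem.Int.floordiv e 2).toNat ≡
          b ^ (2 * (PySem.Int.floordiv e 2).toNat) [ZMOD m] := by
        have := Int.ModEq.pow (PySem.Int.floordiv e 2).toNat (pvmod_modeq (b * b) m)
        rw [pv_sq_pow] at this
        exact this
      rcases hbit with h0 | h1
      · simp only [h0, ne_eq, not_true_eq_false, if_false]
        refine (ih _ r _ hle').trans ?_
        have h3 : e.toNat = 2 * (PySem.Int.floordiv e 2).toNat := by omega
        rw [h3]
        exact (Int.ModEq.refl r).mul hbb
      · simp only [h1, ne_eq, one_ne_zero, not_false_eq_true, if_true]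
        refine (ih _ _ _ hle').trans ?_
        have h3 : e.toNat = 2 * (PySem.Int.floordiv e 2).toNat + 1 := by omega
        rw [h3]
        have hstep := (pvmod_modeq (r * b) m).mul hbb
        rw [show r * b ^ (2 * (PySem.Int.floordiv e 2).toNat + 1) =
          r * b * b ^ (2 * (PySem.Int.floordiv e 2).toNat) from by ring]
        exact hstep
    · rw [pvModexpLoop]
      have h0 : e.toNat = 0 := by omega
      simp [he, h0]

theorem pvModpow_spec (m : Int) : ∀ (n : Nat) (e b : Int), e.toNat ≤ n →
    pvModpow b e m ≡ b ^ e.toNat [ZMOD m] := by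
  intro n
  induction n with
  | zero =>
    intro e b hle
    rw [pvModpow]
    have he : e ≤ 0 := by omega
    have h0 : e.toNat = 0 := by omega
    simp [he, h0]
  | succ n ih =>
    intro e b hle
    by_cases he : e ≤ 0
    · rw [pvModpow]
      have h0 : e.toNat = 0 := by omega
      simp [he, h0]
    · have hepos : 0 < e := by omega
      obtain ⟨hsum, hbit, hq⟩ := pv_split hepos
      have hle' : (PySem.Int.floordiv e 2).toNat ≤ n := by omega
      rw [pvModpow]
      simp only [he, dite_false]
      have ihq := ih (PySem.Int.floordiv e 2) b hle'
      have hh2 : PySem.Int.mod (pvModpow b (PySem.Int.floordiv e 2) m * pvModpow b (PySem.Int.floordiv e 2) m) m ≡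
          b ^ (2 * (PySem.Int.floordiv e 2).toNat) [ZMOD m] := by
        refine (pvmod_modeq _ m).trans ?_
        have := ihq.mul ihq
        rw [← pow_add] at this
        rw [show 2 * (PySem.Int.floordiv e 2).toNat =
          (PySem.Int.floordiv e 2).toNat + (PySem.Int.floordiv e 2).toNat from by omega]
        exact this
      rcases hbit with h0 | h1
      · simp only [h0, ne_eq, not_true_eq_false, if_false]
        have h3 : e.toNat = 2 * (PySem.Int.floordiv e 2).toNat := by omega
        rw [h3]
        exact hh2
      · simp only [h1, ne_eq, one_ne_zero, not_false_eq_true, if_true]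
        have h3 : e.toNat = 2 * (PySem.Int.floordiv e 2).toNat + 1 := by omega
        rw [h3]
        refine (pvmod_modeq _ m).trans ?_
        have := hh2.mul (Int.ModEq.refl b)
        rw [← pow_succ] at this
        exact this

-- the filtered products the two loops accumulate
def pvP (xi x : Int) : List Int → Int
  | [] => 1
  | xj :: rest => (if xj ≠ xi then x - xj else 1) * pvP xi x rest

def pvQ (xi : Int) : List Int → Int
  | [] => 1
  | xj :: rest => (if xj ≠ xi then xi - xj else 1) * pvQ xi rest

theorem pvLoopA_spec (xi x m : Int) : ∀ (l : List Int) (num den : Int),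
    (pvLoopA xi x m num den l).1 ≡ num * pvP xi x l [ZMOD m] ∧
    (pvLoopA xi x m num den l).2 ≡ den * pvQ xi l [ZMOD m] := by
  intro l
  induction l with
  | nil => intro num den; simp [pvLoopA, pvP, pvQ]
  | cons xj rest ih =>
    intro num den
    by_cases hx : xj ≠ xi
    · simp only [pvLoopA, pvP, pvQ, if_pos hx]
      obtain ⟨ih1, ih2⟩ := ih (PySem.Int.mod (num * (x - xj)) m) (PySem.Int.mod (den * (xi - xj)) m)
      constructor
      · refine ih1.trans ?_
        rw [show num * ((x - xj) * pvP xi x rest) = num * (x - xj) * pvP xi x rest from by ring]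
        exact (pvmod_modeq (num * (x - xj)) m).mul (Int.ModEq.refl (pvP xi x rest))
      · refine ih2.trans ?_
        rw [show den * ((xi - xj) * pvQ xi rest) = den * (xi - xj) * pvQ xi rest from by ring]
        exact (pvmod_modeq (den * (xi - xj)) m).mul (Int.ModEq.refl (pvQ xi rest))
    · simp only [pvLoopA, pvP, pvQ, if_neg hx, one_mul]
      exact ih num den

theorem pvLoopB_spec (xi x m : Int) : ∀ (l : List Int) (acc : Int),
    pvLoopB xi x m acc l ≡ acc * pvP xi x l * pvQ xi l ^ (m - 2).toNat [ZMOD m] := by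
  intro l
  induction l with
  | nil => intro acc; simp [pvLoopB, pvP, pvQ]
  | cons xj rest ih =>
    intro acc
    by_cases hx : xj ≠ xi
    · simp only [pvLoopB, pvP, pvQ, if_pos hx]
      refine (ih _).trans ?_
      have hacc : PySem.Int.mod (acc * (x - xj) * pvModpow (xi - xj) (m - 2) m) m ≡
          acc * (x - xj) * (xi - xj) ^ (m - 2).toNat [ZMOD m] :=
        (pvmod_modeq _ m).trans
          ((Int.ModEq.refl (acc * (x - xj))).mul (pvModpow_spec m (m - 2).toNat (m - 2) (xi - xj) le_rfl))
      rw [show acc * ((x - xj) * pvP xi x rest) * ((xi - xj) * pvQ xi rest) ^ (m - 2).toNat =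
        acc * (x - xj) * (xi - xj) ^ (m - 2).toNat * pvP xi x rest * pvQ xi rest ^ (m - 2).toNat from by
          rw [mul_pow]; ring]
      exact (hacc.mul (Int.ModEq.refl (pvP xi x rest))).mul (Int.ModEq.refl (pvQ xi rest ^ (m - 2).toNat))
    · simp only [pvLoopB, pvP, pvQ, if_neg hx, one_mul]
      exact ih acc

-- ===== VERDICT (by name: the statement is the Claim_ definition above) =====
theorem lagrange_coefficient_spec : Claim_equal_lagrange_coefficient := by
  intro xi x_values x m _ hm
  show lagrange_coefficient xi x_values x m = lagrange_coefficient_alt xi x_values x m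
  simp only [lagrange_coefficient, lagrange_coefficient_alt, mod_inv, modexp]
  apply pvmod_congr hm
  obtain ⟨h1, h2⟩ := pvLoopA_spec xi x m x_values 1 1
  rw [one_mul] at h1 h2
  have hinv : pvModexpLoop m 1 (PySem.Int.mod (pvLoopA xi x m 1 1 x_values).2 m) (m - 2) ≡
      pvQ xi x_values ^ (m - 2).toNat [ZMOD m] := by
    refine (pvModexpLoop_spec m (m - 2).toNat (m - 2) 1 _ le_rfl).trans ?_
    rw [one_mul]
    exact Int.ModEq.pow _ ((pvmod_modeq _ m).trans h2)
  have hB := pvLoopB_spec xi x m x_values 1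
  rw [one_mul] at hB
  exact (h1.mul hinv).trans hB.symm
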